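-- pv_equiv track=rewrite | github.com/supermandee/myspotipal | archive/memory_test_suite.py | extract_artists
-- ===== SOURCE A (Python) =====
-- def extract_artists(response):
--     """Helper method to extract artist names from response"""
--     # Split response into words and look for capitalized words that might be artist names
--     words = response.split()
--     potential_artists = []
--     current_name = []
--
--     for word in words:
--         if word[0].isupper():
--             current_name.append(word)
--         elif current_name:
--             if len(current_name) > 0:
--                 potential_artists.append(' '.join(current_name))
--             current_name = []
--
--     if current_name:  # Add last name if exists
--         potential_artists.append(' '.join(current_name))
--
--     return potential_artists
-- ===== SOURCE B (Python) =====
-- def extract_artists(response):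
--     """Helper method to extract artist names from response"""
--     # Span scan: find each maximal run of capitalized words by index and join it,
--     # instead of A's word-by-word accumulator with a flush-on-non-capital branch.
--     words = response.split()
--     n = len(words)
--     out = []
--     i = 0
--     while i < n:
--         if words[i][0].isupper():
--             j = i
--             while j < n and words[j][0].isupper():
--                 j += 1
--             out.append(' '.join(words[i:j]))
--             i = j
--         else:
--             i += 1
--     return out
-- ===== Notes on version B (the rewrite author's own statement) =====
-- stated objective: alternative
-- what changed: Replaces A's per-word accumulator with flush-on-non-capital branches by an index-based span scan that finds each maximal run of capitalized words and joins the slice in one step.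
import Mathlib
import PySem

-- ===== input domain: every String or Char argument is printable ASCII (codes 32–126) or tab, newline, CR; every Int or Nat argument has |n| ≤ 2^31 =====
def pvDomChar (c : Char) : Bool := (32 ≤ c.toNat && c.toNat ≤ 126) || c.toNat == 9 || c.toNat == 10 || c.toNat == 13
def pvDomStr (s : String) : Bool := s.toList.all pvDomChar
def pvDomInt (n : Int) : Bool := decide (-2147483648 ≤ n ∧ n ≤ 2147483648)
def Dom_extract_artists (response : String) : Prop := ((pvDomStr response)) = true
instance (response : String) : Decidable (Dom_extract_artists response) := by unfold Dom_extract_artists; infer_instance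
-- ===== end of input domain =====

-- B replaces A's word-by-word accumulator/flush loop by an index-based span scan over
-- maximal runs of capitalized words; same cost, alternative decomposition.

-- shared helper: Python's word[0].isupper() for a word produced by str.split()
-- (split() words are never empty, so the [] case is unreachable on actual inputs)
def pvHeadUpper (w : String) : Bool :=
  match w.toList with
  | [] => false
  | c :: _ => PySem.Chars.isupper c

-- ===== PORT A =====
def extract_artists (response : String) : List String :=
  let words := PySem.Str.split₀ response
  let st := words.foldl (fun (st : List String × List String) word =>
    let potential := st.1
    let current := st.2
    if pvHeadUpper word then
      (potential, current ++ [word])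
    else if current ≠ [] then
      (if current.length > 0 then potential ++ [PySem.Str.join " " current] else potential, [])
    else
      (potential, current)) ([], [])
  if st.2 ≠ [] then st.1 ++ [PySem.Str.join " " st.2] else st.1

-- ===== PORT B =====
-- inner while: advance j while j < n and words[j][0].isupper()
def pvRunEnd (words : List String) (n j : Nat) : Nat :=
  if h : j < n ∧ pvHeadUpper (words.getD j "") then pvRunEnd words n (j + 1) else j
termination_by n - j
decreasing_by omega

theorem pvRunEnd_ge (words : List String) (n j : Nat) : j ≤ pvRunEnd words n j := by
  fun_induction pvRunEnd words n j with
  | case1 j h ih => omega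
  | case2 j h => omega

-- outer while over i
def pvLoop (words : List String) (n i : Nat) (out : List String) : List String :=
  if h : i < n then
    if hu : pvHeadUpper (words.getD i "") then
      let j := pvRunEnd words n i
      pvLoop words n j (out ++ [PySem.Str.join " " (PySem.List.slice words (some (i : Int)) (some (j : Int)))])
    else
      pvLoop words n (i + 1) out
  else out
termination_by n - i
decreasing_by
  · have h1 : i + 1 ≤ pvRunEnd words n i := by
      rw [pvRunEnd]
      simp only [h, hu, and_self, dite_true]
      exact pvRunEnd_ge words n (i + 1)
    omega
  · omega

def extract_artists_alt (response : String) : List String :=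
  let words := PySem.Str.split₀ response
  pvLoop words words.length 0 []

-- ===== PRECONDITION & SPEC =====
def Spec_extract_artists (response : String) (out : List String) : Prop := out = extract_artists_alt response
instance (response : String) (out : List String) : Decidable (Spec_extract_artists response out) := by unfold Spec_extract_artists; infer_instance

-- ===== CLAIM (what is proved, stated in full; the proofs are below) =====
def Claim_equal_extract_artists : Prop := ∀ (response : String), Dom_extract_artists response → Spec_extract_artists response (extract_artists response)

-- ===== LEMMAS AND PROOFS =====

-- common reference form: recursion over maximal capitalized runs
def pvSpan : List String → List String
  | [] => []
  | w :: ws =>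
    if pvHeadUpper w then
      PySem.Str.join " " (w :: ws.takeWhile pvHeadUpper) :: pvSpan (ws.dropWhile pvHeadUpper)
    else pvSpan ws
termination_by ws => ws.length
decreasing_by
  · have := List.length_dropWhile_le (p := pvHeadUpper) (l := ws)
    simp only [List.length_cons]; omega
  · simp

theorem pvSpan_nil : pvSpan [] = [] := by rw [pvSpan.eq_def]

theorem pvSpan_cons (w : String) (ws : List String) :
    pvSpan (w :: ws) =
      if pvHeadUpper w then
        PySem.Str.join " " (w :: ws.takeWhile pvHeadUpper) :: pvSpan (ws.dropWhile pvHeadUpper)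
      else pvSpan ws := by
  rw [pvSpan.eq_def]

-- A's loop body and finalisation, in zeta-reduced form (definitionally equal to the port's)
def pvStepA (st : List String × List String) (word : String) : List String × List String :=
  if pvHeadUpper word then (st.1, st.2 ++ [word])
  else if st.2 ≠ [] then
    (if st.2.length > 0 then st.1 ++ [PySem.Str.join " " st.2] else st.1, [])
  else (st.1, st.2)

def pvFinA (st : List String × List String) : List String :=
  if st.2 ≠ [] then st.1 ++ [PySem.Str.join " " st.2] else st.1

theorem pvDropWhile_eq_drop (l : List String) :
    l.dropWhile pvHeadUpper = l.drop (l.takeWhile pvHeadUpper).length := by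
  conv_lhs => rw [← List.drop_left (l₁ := l.takeWhile pvHeadUpper) (l₂ := l.dropWhile pvHeadUpper)]
  rw [List.takeWhile_append_dropWhile]

theorem pvRunEnd_eq (words : List String) (j : Nat) :
    pvRunEnd words words.length j = j + ((words.drop j).takeWhile pvHeadUpper).length := by
  fun_induction pvRunEnd words words.length j with
  | case1 j h ih =>
    obtain ⟨hlt, hup⟩ := h
    rw [List.drop_eq_getElem_cons hlt]
    rw [List.getD_eq_getElem words "" hlt] at hup
    rw [List.takeWhile_cons_of_pos hup, List.length_cons, ih]
    omega
  | case2 j h =>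
    by_cases hlt : j < words.length
    · have hup : pvHeadUpper (words.getD j "") = false := by
        cases hB : pvHeadUpper (words.getD j "") with
        | false => rfl
        | true => exact absurd ⟨hlt, hB⟩ h
      rw [List.drop_eq_getElem_cons hlt]
      rw [List.getD_eq_getElem words "" hlt] at hup
      rw [List.takeWhile_cons_of_neg (by simp [hup])]
      rfl
    · have : words.length ≤ j := by omega
      simp [List.drop_eq_nil_of_le this]

theorem pvLoop_eq (words : List String) (i : Nat) (out : List String) :
    pvLoop words words.length i out = out ++ pvSpan (words.drop i) := by
  fun_induction pvLoop words words.length i out with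
  | case1 i out h hu j ih =>
    have hje : j = i + ((words.drop i).takeWhile pvHeadUpper).length := pvRunEnd_eq words i
    have hdropi : words.drop i = words[i] :: words.drop (i + 1) := List.drop_eq_getElem_cons h
    have hupg : pvHeadUpper words[i] = true := by
      rwa [List.getD_eq_getElem words "" h] at hu
    rw [ih]
    rw [PySem.List.slice_natCast]
    have htake : (words.drop i).take (j - i) = (words.drop i).takeWhile pvHeadUpper := by
      rw [hje, Nat.add_sub_cancel_left]
      exact (List.prefix_iff_eq_take.mp (List.takeWhile_prefix pvHeadUpper)).symm
    have hdrop : words.drop j = (words.drop i).dropWhile pvHeadUpper := by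
      rw [hje, ← List.drop_drop, ← pvDropWhile_eq_drop]
    have htw : (words.drop i).takeWhile pvHeadUpper
        = words[i] :: (words.drop (i + 1)).takeWhile pvHeadUpper := by
      rw [hdropi, List.takeWhile_cons_of_pos hupg]
    have hdw : (words.drop i).dropWhile pvHeadUpper
        = (words.drop (i + 1)).dropWhile pvHeadUpper := by
      rw [hdropi, List.dropWhile_cons_of_pos hupg]
    rw [htake, hdrop, htw, hdw]
    conv_rhs => rw [hdropi]
    rw [pvSpan_cons, if_pos hupg]
    simp [List.append_assoc]
  | case2 i out h hu ih =>
    rw [ih]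
    have hdropi : words.drop i = words[i] :: words.drop (i + 1) := List.drop_eq_getElem_cons h
    have hupg : pvHeadUpper words[i] = false := by
      cases hB : pvHeadUpper words[i] with
      | false => rfl
      | true => rw [List.getD_eq_getElem words "" h] at hu; exact absurd hB hu
    conv_rhs => rw [hdropi]
    rw [pvSpan_cons, if_neg (by simp [hupg])]
  | case3 i out h =>
    have hlen : words.length ≤ i := by omega
    rw [List.drop_eq_nil_of_le hlen, pvSpan_nil, List.append_nil]

-- A's fold, characterised against pvSpan
theorem foldA_eq (ws : List String) (pot cur : List String) :
    pvFinA (ws.foldl pvStepA (pot, cur))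
    = pot ++ (if cur = [] then pvSpan ws
              else PySem.Str.join " " (cur ++ ws.takeWhile pvHeadUpper) :: pvSpan (ws.dropWhile pvHeadUpper)) := by
  induction ws generalizing pot cur with
  | nil =>
    by_cases hc : cur = []
    · simp [hc, pvFinA, pvSpan_nil]
    · simp [hc, pvFinA, pvSpan_nil]
  | cons w ws ih =>
    rw [List.foldl_cons]
    by_cases hu : pvHeadUpper w
    · have hstep : pvStepA (pot, cur) w = (pot, cur ++ [w]) := by simp [pvStepA, hu]
      rw [hstep, ih]
      have hne : ¬(cur ++ [w] = []) := by simp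
      rw [if_neg hne]
      by_cases hc : cur = []
      · subst hc
        rw [if_pos rfl, pvSpan_cons, if_pos hu]
        simp
      · rw [if_neg hc, List.takeWhile_cons_of_pos hu, List.dropWhile_cons_of_pos hu]
        simp [List.append_assoc]
    · have hu' : pvHeadUpper w = false := by
        cases hB : pvHeadUpper w with
        | false => rfl
        | true => exact absurd hB hu
      by_cases hc : cur = []
      · have hstep : pvStepA (pot, cur) w = (pot, cur) := by simp [pvStepA, hu', hc]
        rw [hstep, hc, ih, if_pos rfl, if_pos rfl, pvSpan_cons, if_neg hu]
      · have hlen : cur.length > 0 := by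
          cases cur with
          | nil => exact absurd rfl hc
          | cons a l => simp
        have hstep : pvStepA (pot, cur) w = (pot ++ [PySem.Str.join " " cur], []) := by
          simp [pvStepA, hu', hc, hlen]
        rw [hstep, ih, if_pos rfl, if_neg hc,
            List.takeWhile_cons_of_neg (by simp [hu']), List.dropWhile_cons_of_neg (by simp [hu']),
            pvSpan_cons, if_neg hu]
        simp [List.append_assoc]

-- ===== VERDICT (by name: the statement is the Claim_ definition above) =====
theorem extract_artists_spec : Claim_equal_extract_artists := by
  intro response _
  show extract_artists response = extract_artists_alt response
  have hB : extract_artists_alt response = pvSpan (PySem.Str.split₀ response) := by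
    unfold extract_artists_alt
    rw [pvLoop_eq (PySem.Str.split₀ response) 0 []]
    simp
  have hA : pvFinA ((PySem.Str.split₀ response).foldl pvStepA ([], [])) = pvSpan (PySem.Str.split₀ response) := by
    rw [foldA_eq]
    simp
  rw [hB, ← hA]
  rfl
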